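-- pv_equiv track=rewrite | github.com/sueszli/vector-database-benchmark | dataset/python-mutated/loop_basic_test.py | for_one_var
-- ===== SOURCE A (Python) =====
-- def for_one_var(l):
--     if False:
--         i = 10
--         return i + 15
--     i = 0
--     for i in l:
--         pass
--     return i
-- ===== SOURCE B (Python) =====
-- def for_one_var(l):
--     items = list(l)
--     return items[-1] if items else 0
-- ===== Notes on version B (the rewrite author's own statement) =====
-- stated objective: simpler
-- what changed: Replaces the sentinel-tracking for-loop (dead branch removed) with materializing the iterable and indexing the last element.
import Mathlib
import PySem

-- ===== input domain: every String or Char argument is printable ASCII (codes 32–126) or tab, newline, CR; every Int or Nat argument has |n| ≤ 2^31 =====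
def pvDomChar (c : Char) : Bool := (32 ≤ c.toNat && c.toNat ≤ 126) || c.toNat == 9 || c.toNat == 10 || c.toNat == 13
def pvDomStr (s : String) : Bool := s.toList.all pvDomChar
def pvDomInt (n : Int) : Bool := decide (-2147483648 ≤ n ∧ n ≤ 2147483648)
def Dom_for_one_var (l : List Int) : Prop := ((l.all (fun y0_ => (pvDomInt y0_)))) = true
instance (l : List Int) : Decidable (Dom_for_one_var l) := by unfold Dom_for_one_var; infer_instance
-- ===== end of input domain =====

-- B replaces A's sentinel-tracking for-loop with materialize-then-index-last (default 0 on empty); objective: simpler.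


-- ===== PORT A =====
-- A: dead 'if False' branch omitted-as-unreachable is kept as a literal if on False;
-- then i = 0 and the for-loop overwrites i with each element.
def for_one_var (l : List Int) : Int :=
  if False then 10 + 15
  else l.foldl (fun _ x => x) 0

-- ===== PORT B =====
-- B: items = list(l); items[-1] if items else 0 (pyGet? at -1; [] case gives 0)
def for_one_var_alt (l : List Int) : Int :=
  let items := l
  if items ≠ [] then (PySem.List.pyGet? items (-1)).getD 0 else 0

-- ===== PRECONDITION & SPEC =====
def Spec_for_one_var (l : List Int) (out : Int) : Prop := out = for_one_var_alt l
instance (l : List Int) (out : Int) : Decidable (Spec_for_one_var l out) := by unfold Spec_for_one_var; infer_instance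

-- ===== CLAIM (what is proved, stated in full; the proofs are below) =====
def Claim_equal_for_one_var : Prop := ∀ (l : List Int), Dom_for_one_var l → Spec_for_one_var l (for_one_var l)

-- ===== LEMMAS AND PROOFS =====

-- ===== VERDICT (by name: the statement is the Claim_ definition above) =====
theorem foldl_last (l : List Int) (a : Int) :
    l.foldl (fun _ x => x) a = l.getLastD a := by
  induction l generalizing a with
  | nil => rfl
  | cons h t ih =>
    simp [List.foldl, ih, List.getLastD]
    cases t <;> simp [List.getLast]

theorem for_one_var_spec : Claim_equal_for_one_var := by
  intro l _
  unfold Spec_for_one_var for_one_var for_one_var_alt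
  simp only [if_neg (by simp : ¬False)]
  rw [foldl_last]
  cases l with
  | nil => simp
  | cons h t =>
    simp [PySem.List.pyGet?_neg_one, List.getLast?]
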